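-- pv_equiv track=rewrite | github.com/ycm0926/Algorithm | 프로그래머스/unrated/134240. 푸드 파이트 대회/푸드 파이트 대회.py | solution
-- ===== SOURCE A (Python) =====
-- from collections import deque
--
-- def solution(food):
--     q = deque(['0'])
--     for i in range(len(food)-1,0,-1):       # 리스트 -1부터 값을 가져온다
--         if food[i] > 1:                     # 값이 1 초과인 경우
--             for _ in range(food[i]//2):     # 데큐 양쪽에 넣어준다
--                 q.append(str(i))
--                 q.appendleft(str(i))
--     return ''.join(list(q))
-- ===== SOURCE B (Python) =====
-- def solution(food):
--     blocks = [str(i) * (food[i] // 2) for i in range(1, len(food))]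
--     return ''.join(blocks) + '0' + ''.join(reversed(blocks))
-- ===== Notes on version B (the rewrite author's own statement) =====
-- stated objective: simpler
-- what changed: B replaces the deque grown symmetrically from the centre (descending loop with append/appendleft) by a single ascending comprehension building the left half's blocks once, mirrored by reversing the block list.
import Mathlib
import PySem

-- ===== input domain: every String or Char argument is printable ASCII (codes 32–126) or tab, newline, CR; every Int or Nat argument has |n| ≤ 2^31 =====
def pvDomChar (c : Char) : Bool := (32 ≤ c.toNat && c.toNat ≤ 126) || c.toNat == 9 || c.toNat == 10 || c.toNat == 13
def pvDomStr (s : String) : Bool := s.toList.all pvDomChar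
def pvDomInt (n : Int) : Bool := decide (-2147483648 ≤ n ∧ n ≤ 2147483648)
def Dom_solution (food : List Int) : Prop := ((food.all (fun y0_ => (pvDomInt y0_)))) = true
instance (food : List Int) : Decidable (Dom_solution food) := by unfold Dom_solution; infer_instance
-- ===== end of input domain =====

-- B replaces A's centre-grown deque (descending loop, append/appendleft) by one ascending
-- pass building the left half's blocks, mirrored by reversing the block list: simpler.


-- ===== PORT A =====
-- literal port: q is the deque as a List String; appendleft = cons, append = ++ [·];
-- food[i] via pyGetD (i ranges over range(len-1,0,-1), always in range, so the default is dead)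
def solution (food : List Int) : String :=
  let q : List String :=
    (PySem.List.pyRange ((food.length : Int) - 1) 0 (-1)).foldl
      (fun q i =>
        if PySem.List.pyGetD food i 0 > 1 then
          (PySem.List.pyRange 0 (PySem.Int.floordiv (PySem.List.pyGetD food i 0) 2) 1).foldl
            (fun q _ => PySem.Int.toStr i :: (q ++ [PySem.Int.toStr i])) q
        else q)
      ["0"]
  PySem.Str.join "" q

-- ===== PORT B =====
-- str(i) * k ported at the char level; exact: Python's s * k is '' for k ≤ 0, as toNat clamps
def pyRepeatChars (cs : List Char) (k : Int) : List Char :=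
  (List.replicate k.toNat cs).flatten

def solution_alt (food : List Int) : String :=
  let blocks : List (List Char) :=
    (PySem.List.pyRange 1 (food.length : Int) 1).map
      (fun i => pyRepeatChars (PySem.Int.toChars i) (PySem.Int.floordiv (PySem.List.pyGetD food i 0) 2))
  String.ofList (blocks.flatten ++ ['0'] ++ blocks.reverse.flatten)

-- ===== PRECONDITION & SPEC =====
def Spec_solution (food : List Int) (out : String) : Prop := out = solution_alt food
instance (food : List Int) (out : String) : Decidable (Spec_solution food out) := by unfold Spec_solution; infer_instance

-- ===== CLAIM (what is proved, stated in full; the proofs are below) =====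
def Claim_equal_solution : Prop := ∀ (food : List Int), Dom_solution food → Spec_solution food (solution food)

-- ===== LEMMAS AND PROOFS =====

-- A's segment for index i, as the deque's strings
def segS (food : List Int) (i : Int) : List String :=
  List.replicate (PySem.Int.floordiv (PySem.List.pyGetD food i 0) 2).toNat (PySem.Int.toStr i)

-- B's block for index i (chars)
def blockC (food : List Int) (i : Int) : List Char :=
  pyRepeatChars (PySem.Int.toChars i) (PySem.Int.floordiv (PySem.List.pyGetD food i 0) 2)

-- A's inner loop pads the deque symmetrically with l.length copies of s
lemma inner_fold (s : String) : ∀ (l : List Int) (q : List String),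
    l.foldl (fun q _ => s :: (q ++ [s])) q
      = List.replicate l.length s ++ q ++ List.replicate l.length s := by
  have key : ∀ (n : Nat) (Y : List String),
      List.replicate n s ++ s :: Y = s :: (List.replicate n s ++ Y) := by
    intro n Y
    induction n with
    | zero => simp
    | succ m ih => simp [List.replicate_succ, ih]
  intro l
  induction l with
  | nil => intro q; simp
  | cons a t ih =>
      intro q
      simp only [List.foldl_cons, ih, List.length_cons, List.replicate_succ]
      simp [key]

-- A's outer step is q ↦ segS i ++ q ++ segS i
lemma step_eq (food : List Int) (i : Int) (q : List String) :
    (if PySem.List.pyGetD food i 0 > 1 then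
        (PySem.List.pyRange 0 (PySem.Int.floordiv (PySem.List.pyGetD food i 0) 2) 1).foldl
          (fun q _ => PySem.Int.toStr i :: (q ++ [PySem.Int.toStr i])) q
      else q)
      = segS food i ++ q ++ segS food i := by
  set f := PySem.List.pyGetD food i 0 with hf
  by_cases h : f > 1
  · simp only [h, if_pos, inner_fold, segS, ← hf, PySem.List.length_pyRange_one]
    norm_num
  · have h2 : PySem.Int.floordiv f 2 < 1 := by
      rw [PySem.Int.floordiv_lt_iff_lt_mul (by omega)]; omega
    have : (PySem.Int.floordiv f 2).toNat = 0 := by omega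
    simp only [if_neg h, segS, ← hf, this, List.replicate_zero, List.nil_append,
      List.append_nil]

-- folding the symmetric step over any index list
lemma outer_fold (food : List Int) : ∀ (l : List Int) (q : List String),
    l.foldl (fun q i => segS food i ++ q ++ segS food i) q
      = (l.reverse.map (segS food)).flatten ++ q ++ (l.map (segS food)).flatten := by
  intro l
  induction l with
  | nil => intro q; simp
  | cons a t ih =>
      intro q
      simp only [List.foldl_cons, ih, List.reverse_cons, List.map_append, List.map_cons,
        List.flatten_append, List.map_nil, List.flatten_cons]
      simp

-- chars of a segment's concatenation = the block
lemma flat_seg (food : List Int) : ∀ (l : List Int),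
    (((l.map (segS food)).flatten).map String.toList).flatten
      = (l.map (blockC food)).flatten := by
  intro l
  induction l with
  | nil => simp
  | cons a t ih =>
      simp only [List.map_cons, List.flatten_cons, List.map_append, List.flatten_append, ih]
      congr 1
      simp [segS, blockC, pyRepeatChars, List.map_replicate, PySem.Int.toList_toStr]

-- empty-separator join is concatenation
lemma join_nil_flatten : ∀ (parts : List (List Char)),
    PySem.Chars.join [] parts = parts.flatten := by
  intro parts
  simp only [PySem.Chars.join, List.intercalate]
  induction parts with
  | nil => simp
  | cons a t ih => cases t <;> simp_all [List.intersperse]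

lemma solution_eq_alt (food : List Int) : solution food = solution_alt food := by
  unfold solution solution_alt
  simp only [step_eq]
  rw [PySem.List.pyRange_neg_one_eq_reverse]
  have h01 : (0 : Int) + 1 = 1 := by norm_num
  have h1 : (food.length : Int) - 1 + 1 = (food.length : Int) := by ring
  rw [h01, h1, outer_fold]
  rw [PySem.Str.join]
  congr 1
  rw [show ("".toList : List Char) = [] from rfl, join_nil_flatten]
  simp only [List.reverse_reverse, List.map_append, List.flatten_append]
  rw [← List.map_reverse]
  rw [flat_seg, flat_seg]
  have hb : blockC food = fun i =>
      pyRepeatChars (PySem.Int.toChars i)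
        (PySem.Int.floordiv (PySem.List.pyGetD food i 0) 2) := rfl
  simp only [List.map_reverse, hb]
  rfl

-- ===== VERDICT (by name: the statement is the Claim_ definition above) =====
theorem solution_spec : Claim_equal_solution := by
  intro food _
  unfold Spec_solution
  exact solution_eq_alt food
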